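-- pv_equiv track=rewrite | github.com/bharathkadur/CodeSignal | Intro/57. File Naming/FileNaming.py | solution
-- ===== SOURCE A (Python) =====
-- def solution(names):
--     file_count = {}
--     result = []
--
--     for name in names:
--         if name in file_count:
--             count = file_count[name]
--             new_name = f"{name}({count})"
--             while new_name in file_count:
--                 count += 1
--                 new_name = f"{name}({count})"
--             file_count[name] = count + 1
--             file_count[new_name] = 1
--             result.append(new_name)
--         else:
--             file_count[name] = 1
--             result.append(name)
--
--     return result
-- ===== SOURCE B (Python) =====
-- def solution(names):
--     seen = set()
--     result = []
--     for name in names: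
--         if name not in seen:
--             result.append(name)
--             seen.add(name)
--         else:
--             k = 1
--             new_name = "%s(%d)" % (name, k)
--             while new_name in seen:
--                 k += 1
--                 new_name = "%s(%d)" % (name, k)
--             result.append(new_name)
--             seen.add(new_name)
--     return result
-- ===== Notes on version B (the rewrite author's own statement) =====
-- stated objective: simpler
-- what changed: B drops A's per-base-name next-counter memoization dict entirely: it keeps only a set of emitted names and on each collision restarts k at 1, rescanning name(k) until free, so the maintained state is a set instead of a name->counter dict.
import Mathlib
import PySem

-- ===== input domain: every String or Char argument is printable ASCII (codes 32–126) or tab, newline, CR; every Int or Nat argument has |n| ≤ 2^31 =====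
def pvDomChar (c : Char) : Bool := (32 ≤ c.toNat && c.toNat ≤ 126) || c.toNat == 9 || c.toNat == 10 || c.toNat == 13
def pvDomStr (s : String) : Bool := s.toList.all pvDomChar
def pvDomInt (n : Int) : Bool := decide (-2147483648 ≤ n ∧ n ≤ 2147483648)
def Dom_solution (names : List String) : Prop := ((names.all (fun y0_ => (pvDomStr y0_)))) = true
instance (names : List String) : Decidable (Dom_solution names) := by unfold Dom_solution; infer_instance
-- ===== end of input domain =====

-- B replaces A's name -> next-counter dict by a bare set of emitted names, restarting the collision counter at 1 every time (objective: simpler state).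

-- ===== PORT A =====
-- exact port of the format f"{name}({count})" (used by both Pythons' formatting)
def pyFormatParen (name : String) (c : Int) : String :=
  String.ofList (name.toList ++ ('(' :: PySem.Int.toChars c) ++ [')'])

-- A's while loop: count += 1 while f"{name}({count})" is a key of file_count; fuel ≥ #keys+1 always suffices
def findCountA (d : PySem.Dict String Int) (name : String) (count : Int) : Nat → Int
  | 0 => count
  | fuel + 1 =>
    if d.contains (pyFormatParen name count) then findCountA d name (count + 1) fuel else count

def stepA (st : PySem.Dict String Int × List String) (name : String) :
    PySem.Dict String Int × List String :=
  match st.1.get? name with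
  | some count =>
      let c := findCountA st.1 name count (st.1.items.length + 1)
      let newName := pyFormatParen name c
      ((st.1.insert name (c + 1)).insert newName 1, st.2 ++ [newName])
  | none => (st.1.insert name 1, st.2 ++ [name])

def solution (names : List String) : List String :=
  (names.foldl stepA ((PySem.Dict.empty : PySem.Dict String Int), [])).2

-- ===== PORT B =====
-- B's while loop: restart k at 1 and scan the seen-set until name(k) is free
def findNameB (seen : PySem.Set String) (name : String) (k : Int) (newName : String) : Nat → String
  | 0 => newName
  | fuel + 1 =>
    if PySem.Set.contains seen newName then
      findNameB seen name (k + 1) (pyFormatParen name (k + 1)) fuel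
    else newName

def stepB (st : PySem.Set String × List String) (name : String) :
    PySem.Set String × List String :=
  if PySem.Set.contains st.1 name = false then (PySem.Set.add st.1 name, st.2 ++ [name])
  else
    let newName := findNameB st.1 name 1 (pyFormatParen name 1) (st.1.length + 1)
    (PySem.Set.add st.1 newName, st.2 ++ [newName])

def solution_alt (names : List String) : List String :=
  (names.foldl stepB ((PySem.Set.empty : PySem.Set String), [])).2

-- ===== PRECONDITION & SPEC =====
def Spec_solution (names : List String) (out : List String) : Prop := out = solution_alt names
instance (names : List String) (out : List String) : Decidable (Spec_solution names out) := by unfold Spec_solution; infer_instance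

-- ===== CLAIM (what is proved, stated in full; the proofs are below) =====
def Claim_equal_solution : Prop := ∀ (names : List String), Dom_solution names → Spec_solution names (solution names)

-- ===== LEMMAS AND PROOFS =====

-- evaluation of a decimal digit list, used to invert Nat.toDigits
def evalDigits (a : Nat) (cs : List Char) : Nat := cs.foldl (fun a c => a * 10 + (c.toNat - 48)) a

theorem digitChar_toNat_sub (k : Nat) (hk : k < 10) : (Nat.digitChar k).toNat - 48 = k := by
  interval_cases k <;> decide

theorem evalDigits_append_singleton (a : Nat) (xs : List Char) (c : Char) :
    evalDigits a (xs ++ [c]) = evalDigits a xs * 10 + (c.toNat - 48) := by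
  simp [evalDigits, List.foldl_append]

theorem tdc_append (fuel : Nat) : ∀ (n : Nat) (ds : List Char),
    Nat.toDigitsCore 10 fuel n ds = Nat.toDigitsCore 10 fuel n [] ++ ds := by
  induction fuel with
  | zero => intro n ds; simp [Nat.toDigitsCore]
  | succ fuel ih =>
    intro n ds
    by_cases h : n / 10 = 0
    · simp [Nat.toDigitsCore, h]
    · simp only [Nat.toDigitsCore, h, ite_false]
      rw [ih (n / 10) ((n % 10).digitChar :: ds), ih (n / 10) [(n % 10).digitChar]]
      simp

theorem evalDigits_tdc (fuel : Nat) : ∀ (n a : Nat), n < fuel →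
    evalDigits a (Nat.toDigitsCore 10 fuel n []) =
      a * 10 ^ (Nat.toDigitsCore 10 fuel n []).length + n := by
  induction fuel with
  | zero => intro n a hn; exact absurd hn (Nat.not_lt_zero n)
  | succ fuel ih =>
    intro n a hn
    by_cases h : n / 10 = 0
    · have hn10 : n < 10 := by omega
      simp [Nat.toDigitsCore, h, evalDigits, digitChar_toNat_sub n hn10,
        Nat.mod_eq_of_lt hn10]
    · have hlt : n / 10 < fuel := by omega
      simp only [Nat.toDigitsCore, h, ite_false]
      rw [tdc_append fuel (n / 10) [(n % 10).digitChar]]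
      rw [evalDigits_append_singleton, ih (n / 10) a hlt,
        digitChar_toNat_sub (n % 10) (by omega)]
      simp only [List.length_append, List.length_cons, List.length_nil]
      rw [pow_succ, ← mul_assoc]
      generalize a * 10 ^ (Nat.toDigitsCore 10 fuel (n / 10) []).length = Q
      omega

theorem toDigits_inj (n m : Nat) (h : Nat.toDigits 10 n = Nat.toDigits 10 m) : n = m := by
  unfold Nat.toDigits at h
  have e1 := evalDigits_tdc (n + 1) n 0 (Nat.lt_succ_self n)
  have e2 := evalDigits_tdc (m + 1) m 0 (Nat.lt_succ_self m)
  rw [h] at e1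
  simp only [Nat.zero_mul, Nat.zero_add] at e1 e2
  rw [e2] at e1
  omega

theorem pyFormatParen_inj (name : String) (a b : Int) (ha : 0 ≤ a) (hb : 0 ≤ b)
    (h : pyFormatParen name a = pyFormatParen name b) : a = b := by
  unfold pyFormatParen at h
  have h1 : name.toList ++ ('(' :: PySem.Int.toChars a) ++ [')'] =
      name.toList ++ ('(' :: PySem.Int.toChars b) ++ [')'] := by
    have := congrArg String.toList h
    simpa using this
  have h2 : PySem.Int.toChars a = PySem.Int.toChars b := by
    have h3 := List.append_cancel_right h1
    have h4 := List.append_cancel_left h3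
    exact List.tail_eq_of_cons_eq h4
  simp only [PySem.Int.toChars, if_neg (not_lt.mpr ha), if_neg (not_lt.mpr hb)] at h2
  have := toDigits_inj a.toNat b.toNat h2
  omega

-- pigeonhole: among l.length + 1 consecutive candidate names one is not in l
theorem exists_free (l : List String) (name : String) (c : Int) (hc : 1 ≤ c) :
    ∃ n : Nat, n < l.length + 1 ∧ pyFormatParen name (c + n) ∉ l := by
  by_contra hno
  push Not at hno
  have hnd : ((List.range (l.length + 1)).map (fun n : Nat => pyFormatParen name (c + (n : Int)))).Nodup := by
    refine List.nodup_range.map_on ?_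
    intro i _ j _ hij
    have h := pyFormatParen_inj name (c + i) (c + j) (by omega) (by omega) hij
    omega
  have hsub : ((List.range (l.length + 1)).map (fun n : Nat => pyFormatParen name (c + (n : Int)))) ⊆ l := by
    intro x hx
    simp only [List.mem_map, List.mem_range] at hx
    obtain ⟨n, hn, rfl⟩ := hx
    exact hno n hn
  have hle := (hnd.subperm hsub).length_le
  simp at hle

def IsFirstFree (P : String → Prop) (name : String) (start k : Int) : Prop :=
  start ≤ k ∧ ¬ P (pyFormatParen name k) ∧ ∀ j : Int, start ≤ j → j < k → P (pyFormatParen name j)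

theorem IsFirstFree.unique {P : String → Prop} {name : String} {s k k' : Int}
    (h1 : IsFirstFree P name s k) (h2 : IsFirstFree P name s k') : k = k' := by
  by_contra hne
  rcases lt_trichotomy k k' with h | h | h
  · exact h1.2.1 (h2.2.2 k h1.1 h)
  · exact hne h
  · exact h2.2.1 (h1.2.2 k' h2.1 h)

theorem findCountA_spec (d : PySem.Dict String Int) (name : String) :
    ∀ (fuel : Nat) (c : Int),
      (∃ n : Nat, n < fuel ∧ d.contains (pyFormatParen name (c + n)) = false) →
      IsFirstFree (fun s => d.contains s = true) name c (findCountA d name c fuel) := by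
  intro fuel
  induction fuel with
  | zero => intro c ⟨n, hn, _⟩; exact absurd hn (Nat.not_lt_zero n)
  | succ fuel ih =>
    intro c ⟨n, hn, hfree⟩
    by_cases hct : d.contains (pyFormatParen name c) = true
    · have hstep : findCountA d name c (fuel + 1) = findCountA d name (c + 1) fuel := by
        simp [findCountA, hct]
      have hn0 : n ≠ 0 := by
        rintro rfl
        simp only [Nat.cast_zero, add_zero] at hfree
        rw [hfree] at hct
        exact Bool.false_ne_true hct
      have hex : ∃ m : Nat, m < fuel ∧ d.contains (pyFormatParen name ((c + 1) + m)) = false := by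
        refine ⟨n - 1, by omega, ?_⟩
        have heq : (c + 1) + ((n - 1 : Nat) : Int) = c + (n : Int) := by omega
        rw [heq]; exact hfree
      have h1 := ih (c + 1) hex
      rw [hstep]
      refine ⟨by have := h1.1; omega, h1.2.1, ?_⟩
      intro j hcj hjk
      by_cases hj : j = c
      · rw [hj]; exact hct
      · exact h1.2.2 j (by omega) hjk
    · have hstep : findCountA d name c (fuel + 1) = c := by
        simp only [findCountA]
        rw [if_neg hct]
      rw [hstep]
      exact ⟨le_refl c, hct, fun j h1 h2 => absurd (lt_of_le_of_lt h1 h2) (lt_irrefl c)⟩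

theorem findNameB_spec (seen : PySem.Set String) (name : String) :
    ∀ (fuel : Nat) (k : Int),
      (∃ n : Nat, n < fuel ∧ pyFormatParen name (k + n) ∉ seen) →
      ∃ k', findNameB seen name k (pyFormatParen name k) fuel = pyFormatParen name k' ∧
        IsFirstFree (· ∈ seen) name k k' := by
  intro fuel
  induction fuel with
  | zero => intro k ⟨n, hn, _⟩; exact absurd hn (Nat.not_lt_zero n)
  | succ fuel ih =>
    intro k ⟨n, hn, hfree⟩
    by_cases hmem : pyFormatParen name k ∈ seen
    · have hct : PySem.Set.contains seen (pyFormatParen name k) = true :=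
        (PySem.Set.contains_iff ..).mpr hmem
      have hstep : findNameB seen name k (pyFormatParen name k) (fuel + 1) =
          findNameB seen name (k + 1) (pyFormatParen name (k + 1)) fuel := by
        simp only [findNameB]
        rw [if_pos hct]
      have hn0 : n ≠ 0 := by
        rintro rfl
        simp only [Nat.cast_zero, add_zero] at hfree
        exact hfree hmem
      have hex : ∃ m : Nat, m < fuel ∧ pyFormatParen name ((k + 1) + m) ∉ seen := by
        refine ⟨n - 1, by omega, ?_⟩
        have heq : (k + 1) + ((n - 1 : Nat) : Int) = k + (n : Int) := by omega
        rw [heq]; exact hfree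
      obtain ⟨k', heq, hff⟩ := ih (k + 1) hex
      rw [hstep, heq]
      refine ⟨k', rfl, by have := hff.1; omega, hff.2.1, ?_⟩
      intro j h1 h2
      by_cases hj : j = k
      · rw [hj]; exact hmem
      · exact hff.2.2 j (by omega) h2
    · have hct : ¬ PySem.Set.contains seen (pyFormatParen name k) = true := by
        rw [PySem.Set.contains_iff]; exact hmem
      have hstep : findNameB seen name k (pyFormatParen name k) (fuel + 1) =
          pyFormatParen name k := by
        simp only [findNameB]
        rw [if_neg hct]
      exact ⟨k, hstep, le_refl k, hmem,
        fun j h1 h2 => absurd (lt_of_le_of_lt h1 h2) (lt_irrefl k)⟩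

-- the simulation invariant between A's dict and B's set
def SimInv (d : PySem.Dict String Int) (seen : PySem.Set String) : Prop :=
  (∀ s : String, d.contains s = true ↔ s ∈ seen) ∧
  (∀ s : String, ∀ c : Int, d.get? s = some c →
    1 ≤ c ∧ ∀ j : Int, 1 ≤ j → j < c → pyFormatParen s j ∈ seen)

theorem step_sim (d : PySem.Dict String Int) (seen : PySem.Set String) (res : List String)
    (name : String) (hInv : SimInv d seen) :
    ∃ d' seen' e, stepA (d, res) name = (d', res ++ [e]) ∧
      stepB (seen, res) name = (seen', res ++ [e]) ∧ SimInv d' seen' := by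
  cases hget : d.get? name with
  | none =>
    have hctd : d.contains name = false := by
      rw [PySem.Dict.contains_eq_isSome_get?, hget]; rfl
    have hmem : name ∉ seen := by
      intro hm
      have := (hInv.1 name).mpr hm
      rw [hctd] at this
      exact Bool.false_ne_true this
    have hcts : PySem.Set.contains seen name = false := by
      rw [Bool.eq_false_iff]
      intro hc
      exact hmem ((PySem.Set.contains_iff ..).mp hc)
    refine ⟨d.insert name 1, seen ++ [name], name, ?_, ?_, ?_, ?_⟩
    · simp [stepA, hget]
    · simp only [stepB]
      rw [if_pos hcts, PySem.Set.add_of_not_mem hmem]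
    · intro s
      rw [PySem.Dict.contains_insert]
      simp only [Bool.or_eq_true, beq_iff_eq, hInv.1 s, List.mem_append,
        List.mem_singleton]
      tauto
    · intro s c hc
      by_cases hs : s = name
      · subst hs
        rw [PySem.Dict.get?_insert_self] at hc
        cases hc
        exact ⟨le_refl 1, fun j h1 h2 => absurd (lt_of_le_of_lt h1 h2) (lt_irrefl 1)⟩
      · rw [PySem.Dict.get?_insert_of_ne _ _ hs] at hc
        obtain ⟨h1, h2⟩ := hInv.2 s c hc
        exact ⟨h1, fun j a b => List.mem_append_left _ (h2 j a b)⟩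
  | some count =>
    obtain ⟨hc1, hbelow⟩ := hInv.2 name count hget
    have hexA : ∃ n : Nat, n < d.items.length + 1 ∧
        d.contains (pyFormatParen name (count + n)) = false := by
      obtain ⟨n, hn, hnotmem⟩ := exists_free d.keys name count hc1
      refine ⟨n, by simpa [PySem.Dict.keys] using hn, ?_⟩
      rw [Bool.eq_false_iff]
      intro hc
      exact hnotmem ((PySem.Dict.contains_iff_mem_keys ..).mp hc)
    have hffA := findCountA_spec d name (d.items.length + 1) count hexA
    set kA := findCountA d name count (d.items.length + 1) with hkA
    have hffA' : IsFirstFree (· ∈ seen) name count kA :=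
      ⟨hffA.1, fun hm => hffA.2.1 ((hInv.1 _).mpr hm),
        fun j a b => (hInv.1 _).mp (hffA.2.2 j a b)⟩
    have hffA1 : IsFirstFree (· ∈ seen) name 1 kA := by
      refine ⟨by have := hffA'.1; omega, hffA'.2.1, ?_⟩
      intro j h1 h2
      by_cases hj : j < count
      · exact hbelow j h1 hj
      · exact hffA'.2.2 j (by omega) h2
    have hmem : name ∈ seen := (hInv.1 name).mp (by
      rw [PySem.Dict.contains_eq_isSome_get?, hget]; rfl)
    have hcts : ¬ PySem.Set.contains seen name = false := by
      rw [Bool.not_eq_false]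
      exact (PySem.Set.contains_iff ..).mpr hmem
    have hexB : ∃ n : Nat, n < seen.length + 1 ∧ pyFormatParen name (1 + n) ∉ seen :=
      exists_free seen name 1 (le_refl 1)
    obtain ⟨kB, heqB, hffB⟩ := findNameB_spec seen name (seen.length + 1) 1 hexB
    have hkk : kA = kB := IsFirstFree.unique hffA1 hffB
    have hnotin : pyFormatParen name kA ∉ seen := hffA1.2.1
    refine ⟨(d.insert name (kA + 1)).insert (pyFormatParen name kA) 1,
      seen ++ [pyFormatParen name kA], pyFormatParen name kA, ?_, ?_, ?_, ?_⟩
    · simp only [stepA, hget]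
      rw [← hkA]
    · simp only [stepB]
      rw [if_neg hcts]
      rw [heqB, ← hkk, PySem.Set.add_of_not_mem hnotin]
    · intro s
      rw [PySem.Dict.contains_insert, PySem.Dict.contains_insert]
      simp only [Bool.or_eq_true, beq_iff_eq, hInv.1 s, List.mem_append,
        List.mem_singleton]
      constructor
      · rintro (h | h | h)
        · exact Or.inr h
        · exact Or.inl (h ▸ hmem)
        · exact Or.inl h
      · rintro (h | h)
        · exact Or.inr (Or.inr h)
        · exact Or.inl h
    · intro s c hc
      by_cases hs1 : s = pyFormatParen name kA
      · subst hs1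
        rw [PySem.Dict.get?_insert_self] at hc
        cases hc
        exact ⟨le_refl 1, fun j h1 h2 => absurd (lt_of_le_of_lt h1 h2) (lt_irrefl 1)⟩
      · rw [PySem.Dict.get?_insert_of_ne _ _ hs1] at hc
        by_cases hs2 : s = name
        · subst hs2
          rw [PySem.Dict.get?_insert_self] at hc
          cases hc
          refine ⟨by have := hffA1.1; omega, ?_⟩
          intro j h1 h2
          by_cases hj : j = kA
          · rw [hj]
            exact List.mem_append_right _ (List.mem_singleton.mpr rfl)
          · exact List.mem_append_left _ (hffA1.2.2 j h1 (by omega))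
        · rw [PySem.Dict.get?_insert_of_ne _ _ hs2] at hc
          obtain ⟨h1, h2⟩ := hInv.2 s c hc
          exact ⟨h1, fun j a b => List.mem_append_left _ (h2 j a b)⟩

theorem fold_sim (names : List String) : ∀ (d : PySem.Dict String Int)
    (seen : PySem.Set String) (res : List String), SimInv d seen →
    (names.foldl stepA (d, res)).2 = (names.foldl stepB (seen, res)).2 := by
  induction names with
  | nil => intro d seen res _; rfl
  | cons name names ih =>
    intro d seen res hInv
    obtain ⟨d', seen', e, hA, hB, hInv'⟩ := step_sim d seen res name hInv
    simp only [List.foldl, hA, hB]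
    exact ih d' seen' (res ++ [e]) hInv'

-- ===== VERDICT (by name: the statement is the Claim_ definition above) =====
theorem solution_spec : Claim_equal_solution := by
  intro names _
  unfold Spec_solution solution solution_alt
  refine fold_sim names _ _ [] ⟨fun s => ?_, fun s c h => ?_⟩
  · simp [PySem.Dict.contains_empty, PySem.Set.empty]
  · simp [PySem.Dict.get?_empty] at h
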